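-- pv_equiv track=rewrite | github.com/ahila87/RubicsCube | RubicCube/RCube/dispatch.py | createCube
-- ===== SOURCE A (Python) =====
-- def createCube(parm):
--     parm1 = {'op':'create', 'f':'f', 'r':'r', 'b':'b', 'l':'l', 't':'t', 'u':'u'}
--     colors = {'f':'green', 'r':'yellow', 'b':'blue', 'l':'white', 't':'red', 'u':'orange'}
--     cube = []
--
--     if parm == {'op': 'create'}:
--         actualFaces = ['f', 'r', 'b', 'l', 't', 'u']
--         for faces in actualFaces:
--             for _ in range(0,9):
--                 cube.append(colors[faces])
--
--     elif parm.keys() == parm1.keys():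
--         actualFaces = ['f', 'r', 'b', 'l', 't', 'u']
--         for faces in actualFaces:
--             for _ in range(0,9):
--                 cube.append(parm[faces])
--
--     elif  parm.keys() != parm1.keys():
--         actualFaces = ['f', 'r', 'b', 'l', 't', 'u']
--         for faces in actualFaces:
--             for _ in range(0,9):
--                 if faces not in parm.keys():
--                     cube.append(colors[faces])
--                 else:
--                     cube.append(parm[faces])
--     return cube
-- ===== SOURCE B (Python) =====
-- def createCube(parm):
--     faces = ['f', 'r', 'b', 'l', 't', 'u']
--     defaults = ['green', 'yellow', 'blue', 'white', 'red', 'orange']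
--     cube = [c for c in defaults for _ in range(9)]
--     for key, val in parm.items():
--         if key in faces:
--             i = faces.index(key)
--             cube[9 * i: 9 * i + 9] = [val] * 9
--     return cube
-- ===== Notes on version B (the rewrite author's own statement) =====
-- stated objective: alternative
-- what changed: A dispatches on three dict/keys-equality cases and looks a color up for each of the 54 output slots; B instead builds the 54-element default-colored list once and then, iterating over parm's items, overwrites the 9-element slice of each face key actually present, so the per-slot lookup and the whole three-way dispatch disappear.
import Mathlib
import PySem

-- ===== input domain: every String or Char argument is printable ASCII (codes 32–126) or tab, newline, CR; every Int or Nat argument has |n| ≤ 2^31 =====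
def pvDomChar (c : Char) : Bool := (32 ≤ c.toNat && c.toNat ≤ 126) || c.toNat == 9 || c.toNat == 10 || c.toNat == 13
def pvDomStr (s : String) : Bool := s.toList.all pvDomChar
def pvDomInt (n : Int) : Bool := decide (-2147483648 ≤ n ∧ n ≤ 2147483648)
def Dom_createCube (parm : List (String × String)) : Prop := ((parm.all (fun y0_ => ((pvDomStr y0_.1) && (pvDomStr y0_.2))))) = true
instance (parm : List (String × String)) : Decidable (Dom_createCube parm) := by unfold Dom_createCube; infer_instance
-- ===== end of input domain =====

-- B builds the 54-element default-colored list once and then overwrites one 9-element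
-- slice per face key present in parm, instead of A's three-way dispatch that looks up
-- every one of the 54 elements (objective: alternative construction, same cost).

-- ===== PORT A =====
-- Python dict '==' : same key set and same value at every key (order-insensitive)
def pyDictEq (d1 d2 : PySem.Dict String String) : Bool :=
  d1.size == d2.size && d1.items.all (fun p => d2.get? p.1 == some p.2)

-- Python dict_keys '==' : set equality of the key lists
def pyKeysEq (xs ys : List String) : Bool :=
  xs.all (fun k => ys.contains k) && ys.all (fun k => xs.contains k)

def createCube (parm : List (String × String)) : List String :=
  let d := PySem.Dict.ofList parm
  let parm1 := PySem.Dict.ofList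
    [("op","create"),("f","f"),("r","r"),("b","b"),("l","l"),("t","t"),("u","u")]
  let colors := PySem.Dict.ofList
    [("f","green"),("r","yellow"),("b","blue"),("l","white"),("t","red"),("u","orange")]
  if pyDictEq d (PySem.Dict.ofList [("op","create")]) then
    -- colors[faces]: the key is always present in the literal dict, so getD is exact
    ["f","r","b","l","t","u"].foldl (fun cube faces =>
      (PySem.List.pyRange 0 9 1).foldl (fun cube _ => cube ++ [colors.getD faces ""]) cube) []
  else if pyKeysEq d.keys parm1.keys then
    -- parm[faces]: the branch guard guarantees the key is present, so getD is exact
    ["f","r","b","l","t","u"].foldl (fun cube faces =>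
      (PySem.List.pyRange 0 9 1).foldl (fun cube _ => cube ++ [d.getD faces ""]) cube) []
  else if !(pyKeysEq d.keys parm1.keys) then
    ["f","r","b","l","t","u"].foldl (fun cube faces =>
      (PySem.List.pyRange 0 9 1).foldl (fun cube _ =>
        cube ++ [if !(d.contains faces) then colors.getD faces "" else d.getD faces ""]) cube) []
  else []

-- ===== PORT B =====
-- The body of Source B's for-loop over parm.items(): 'key in faces' and 'faces.index(key)'
-- are ported together as one match on PySem.List.index? (some i exactly when key is in
-- faces, with i its index); the slice assignment cube[9*i:9*i+9] = [val]*9 is ported by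
-- hand as take/++/drop, exact here since 0 ≤ 9*i and 9*i+9 ≤ 54 = len(cube).
def patchFace (cube : List String) (kv : String × String) : List String :=
  match PySem.List.index? ["f","r","b","l","t","u"] kv.1 with
  | some i => cube.take (9 * i) ++ List.replicate 9 kv.2 ++ cube.drop (9 * i + 9)
  | none => cube

def createCube_alt (parm : List (String × String)) : List String :=
  let d := PySem.Dict.ofList parm
  let defaults : List String := ["green", "yellow", "blue", "white", "red", "orange"]
  let cube := defaults.flatMap (fun c => (PySem.List.pyRange 0 9 1).map (fun _ => c))
  d.items.foldl patchFace cube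

-- ===== PRECONDITION & SPEC =====
def Spec_createCube (parm : List (String × String)) (out : List String) : Prop := out = createCube_alt parm
instance (parm : List (String × String)) (out : List String) : Decidable (Spec_createCube parm out) := by unfold Spec_createCube; infer_instance

-- ===== CLAIM (what is proved, stated in full; the proofs are below) =====
def Claim_equal_createCube : Prop := ∀ (parm : List (String × String)), Dom_createCube parm → Spec_createCube parm (createCube parm)

-- ===== LEMMAS AND PROOFS =====

-- the 54-element cube as six 9-element face segments
def seg6 (a b c l t u : String) : List String :=
  List.replicate 9 a ++ List.replicate 9 b ++ List.replicate 9 c ++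
  List.replicate 9 l ++ List.replicate 9 t ++ List.replicate 9 u

-- the value a left fold of per-key overwrites leaves for key k, starting from x
def lastVal (L : List (String × String)) (k x : String) : String :=
  L.foldl (fun x kv => if kv.1 = k then kv.2 else x) x

lemma lastVal_nil (k x : String) : lastVal [] k x = x := rfl

lemma lastVal_cons (p : String × String) (L : List (String × String)) (k x : String) :
    lastVal (p :: L) k x = lastVal L k (if p.1 = k then p.2 else x) := rfl

lemma lastVal_not_mem (L : List (String × String)) (k x : String)
    (h : ∀ p ∈ L, p.1 ≠ k) : lastVal L k x = x := by
  induction L generalizing x with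
  | nil => rfl
  | cons p rest ih =>
    rw [lastVal_cons, if_neg (h p (by simp))]
    exact ih x (fun q hq => h q (by simp [hq]))

-- with no duplicate keys, the fold's final value is the dict's first-match lookup
lemma lastVal_mk (L : List (String × String)) (h : (L.map (·.1)).Nodup) (k x : String) :
    lastVal L k x = ((PySem.Dict.mk L).get? k).getD x := by
  induction L generalizing x with
  | nil => simp [lastVal_nil]; rfl
  | cons p rest ih =>
    obtain ⟨k0, v0⟩ := p
    rw [lastVal_cons, PySem.Dict.get?_mk_cons]
    simp only [List.map_cons, List.nodup_cons] at h
    by_cases hk : k0 = k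
    · subst hk
      rw [if_pos rfl, if_pos (by simp), Option.getD_some]
      refine lastVal_not_mem rest k0 v0 (fun q hq hqk => h.1 ?_)
      rw [← hqk]
      exact List.mem_map_of_mem hq
    · rw [if_neg hk, if_neg (by simpa using hk)]
      exact ih h.2 x

-- one patch step on a six-segment cube rewrites exactly the matching segment
lemma patchStep (a b c l t u : String) (kv : String × String) :
    patchFace (seg6 a b c l t u) kv =
      seg6 (if kv.1 = "f" then kv.2 else a) (if kv.1 = "r" then kv.2 else b)
        (if kv.1 = "b" then kv.2 else c) (if kv.1 = "l" then kv.2 else l)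
        (if kv.1 = "t" then kv.2 else t) (if kv.1 = "u" then kv.2 else u) := by
  obtain ⟨k, v⟩ := kv
  by_cases hf : k = "f"
  · subst hf; rfl
  by_cases hr : k = "r"
  · subst hr; rfl
  by_cases hb : k = "b"
  · subst hb; rfl
  by_cases hl : k = "l"
  · subst hl; rfl
  by_cases ht : k = "t"
  · subst ht; rfl
  by_cases hu : k = "u"
  · subst hu; rfl
  have hidx : PySem.List.index? ["f","r","b","l","t","u"] k = none := by
    rw [PySem.List.index?_eq_none_iff]; simp [hf, hr, hb, hl, ht, hu]
  simp only [patchFace, hidx]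
  simp [hf, hr, hb, hl, ht, hu]

-- folding all patches over a six-segment cube yields the per-face last values
lemma foldPatch (L : List (String × String)) : ∀ a b c l t u : String,
    L.foldl patchFace (seg6 a b c l t u) =
      seg6 (lastVal L "f" a) (lastVal L "r" b) (lastVal L "b" c)
        (lastVal L "l" l) (lastVal L "t" t) (lastVal L "u" u) := by
  induction L with
  | nil => intro a b c l t u; rfl
  | cons kv rest ih =>
    intro a b c l t u
    rw [List.foldl_cons, patchStep, ih]
    simp only [lastVal_cons]

-- B computes, for each face, parm's value when present and the default otherwise
lemma alt_eq (parm : List (String × String)) :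
    createCube_alt parm =
      seg6 (((PySem.Dict.ofList parm).get? "f").getD "green")
        (((PySem.Dict.ofList parm).get? "r").getD "yellow")
        (((PySem.Dict.ofList parm).get? "b").getD "blue")
        (((PySem.Dict.ofList parm).get? "l").getD "white")
        (((PySem.Dict.ofList parm).get? "t").getD "red")
        (((PySem.Dict.ofList parm).get? "u").getD "orange") := by
  have hnd : ((PySem.Dict.ofList parm).items.map (·.1)).Nodup := by
    have := PySem.Dict.nodup_keys_ofList (ν := String) parm
    simpa [PySem.Dict.keys] using this
  have hmk : PySem.Dict.mk (PySem.Dict.ofList parm).items = PySem.Dict.ofList parm := rfl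
  show (PySem.Dict.ofList parm).items.foldl patchFace
      (["green","yellow","blue","white","red","orange"].flatMap
        (fun c => (PySem.List.pyRange 0 9 1).map (fun _ => c))) = _
  rw [show (["green","yellow","blue","white","red","orange"].flatMap
      (fun c => (PySem.List.pyRange 0 9 1).map (fun _ => c)))
      = seg6 "green" "yellow" "blue" "white" "red" "orange" from rfl]
  rw [foldPatch, lastVal_mk _ hnd, lastVal_mk _ hnd, lastVal_mk _ hnd,
    lastVal_mk _ hnd, lastVal_mk _ hnd, lastVal_mk _ hnd, hmk]

-- when the key is present, Python's d.get(k, c) equals d[k]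
lemma getD_get?_of_contains (d : PySem.Dict String String) (f c : String)
    (h : d.contains f = true) : (d.get? f).getD c = d.getD f "" := by
  cases hv : d.get? f with
  | none => rw [PySem.Dict.contains_eq_isSome_get?, hv] at h; simp at h
  | some v => simp [PySem.Dict.getD_eq_get?_getD, hv]

-- a dict Python-equal to {'op':'create'} has no other key
lemma get?_eq_none_of_dictEq_op (d : PySem.Dict String String)
    (h : pyDictEq d (PySem.Dict.ofList [("op","create")]) = true)
    (f : String) (hf : f ≠ "op") : d.get? f = none := by
  unfold pyDictEq at h
  simp only [Bool.and_eq_true, beq_iff_eq, List.all_eq_true] at h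
  obtain ⟨hsz, hall⟩ := h
  rcases d with ⟨items⟩
  have hsz' : items.length = 1 := hsz
  obtain ⟨⟨k, v⟩, rfl⟩ := List.length_eq_one_iff.mp hsz'
  have hk := hall (k, v) (by simp)
  rw [show (PySem.Dict.ofList [("op","create")] : PySem.Dict String String)
      = ⟨[("op","create")]⟩ from rfl] at hk
  rw [PySem.Dict.get?_mk_cons] at hk ⊢
  by_cases hkop : ("op" == k) = true
  · have hk2 : k = "op" := (beq_iff_eq.mp hkop).symm
    subst hk2
    rw [if_neg (show ¬("op" == f) = true from by rw [beq_iff_eq]; exact fun h => hf h.symm)]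
    rfl
  · rw [if_neg hkop] at hk
    exact absurd hk (by rw [show ({ items := [] } : PySem.Dict String String).get? k = none from rfl]; simp)

-- branch 3's per-face element is exactly parm.get(face, default)
lemma elem3 (d : PySem.Dict String String) (f c : String) :
    (if d.contains f = false then c else d.getD f "") = (d.get? f).getD c := by
  by_cases h : d.contains f = true
  · simp [h, getD_get?_of_contains d f c h]
  · have hn : d.get? f = none := (PySem.Dict.get?_eq_none_iff_contains d f).mpr (by simpa using h)
    simp [h, hn]

-- ===== VERDICT =====
theorem createCube_spec : Claim_equal_createCube := by
  intro parm _
  unfold Spec_createCube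
  rw [alt_eq]
  unfold createCube
  set d := PySem.Dict.ofList parm with hd
  have hrange : PySem.List.pyRange 0 9 1 = [0,1,2,3,4,5,6,7,8] := by decide
  have cf : (PySem.Dict.ofList [("f","green"),("r","yellow"),("b","blue"),("l","white"),("t","red"),("u","orange")]).getD "f" "" = "green" := rfl
  have cr : (PySem.Dict.ofList [("f","green"),("r","yellow"),("b","blue"),("l","white"),("t","red"),("u","orange")]).getD "r" "" = "yellow" := rfl
  have cb : (PySem.Dict.ofList [("f","green"),("r","yellow"),("b","blue"),("l","white"),("t","red"),("u","orange")]).getD "b" "" = "blue" := rfl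
  have cl : (PySem.Dict.ofList [("f","green"),("r","yellow"),("b","blue"),("l","white"),("t","red"),("u","orange")]).getD "l" "" = "white" := rfl
  have ct : (PySem.Dict.ofList [("f","green"),("r","yellow"),("b","blue"),("l","white"),("t","red"),("u","orange")]).getD "t" "" = "red" := rfl
  have cu : (PySem.Dict.ofList [("f","green"),("r","yellow"),("b","blue"),("l","white"),("t","red"),("u","orange")]).getD "u" "" = "orange" := rfl
  by_cases h1 : pyDictEq d (PySem.Dict.ofList [("op","create")]) = true
  · -- branch 1: every face key is absent, both sides give the default colors
    have hf := get?_eq_none_of_dictEq_op d h1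
    simp [h1, hrange, seg6, cf, cr, cb, cl, ct, cu, hf "f" (by decide), hf "r" (by decide),
      hf "b" (by decide), hf "l" (by decide), hf "t" (by decide), hf "u" (by decide)]
  · by_cases h2 : pyKeysEq d.keys (PySem.Dict.ofList
        [("op","create"),("f","f"),("r","r"),("b","b"),("l","l"),("t","t"),("u","u")]).keys = true
    · -- branch 2: every face key is present, both sides give parm's value
      have hc : ∀ f : String, f ∈ (["op","f","r","b","l","t","u"] : List String) →
          d.contains f = true := by
        unfold pyKeysEq at h2
        simp only [Bool.and_eq_true, List.all_eq_true] at h2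
        intro f hfm
        have hmem := h2.2 f (by
          have : (PySem.Dict.ofList [("op","create"),("f","f"),("r","r"),("b","b"),
              ("l","l"),("t","t"),("u","u")] : PySem.Dict String String).keys
              = ["op","f","r","b","l","t","u"] := by decide
          rw [this]; exact hfm)
        rw [PySem.Dict.contains_iff_mem_keys]
        simpa using hmem
      have he : ∀ f c : String, f ∈ (["op","f","r","b","l","t","u"] : List String) →
          (d.get? f).getD c = d.getD f "" := fun f c hfm => getD_get?_of_contains d f c (hc f hfm)
      simp [h1, h2, hrange, seg6, he "f" "green" (by decide),
        he "r" "yellow" (by decide), he "b" "blue" (by decide), he "l" "white" (by decide),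
        he "t" "red" (by decide), he "u" "orange" (by decide)]
    · -- branch 3: per face, the if-present test equals parm.get(face, default)
      simp [h1, h2, hrange, seg6, cf, cr, cb, cl, ct, cu, elem3]
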